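-- pv_equiv track=rewrite | github.com/adamhammes/advent-of-code | 2022/day25.py | from_snafu
-- ===== SOURCE A (Python) =====
-- def from_snafu(snafu: str) -> int:
--     parts = []
--     for i, char in enumerate(snafu[::-1]):
--         positional_value = {
--             "0": 0,
--             "1": 1,
--             "2": 2,
--             "=": -2,
--             "-": -1,
--         }[char]
--
--         parts.append(positional_value * 5**i)
--
--     return sum(parts)
-- ===== SOURCE B (Python) =====
-- def from_snafu(snafu: str) -> int:
--     digits = {"0": 0, "1": 1, "2": 2, "=": -2, "-": -1}
--     result = 0
--     for char in snafu:
--         result = result * 5 + digits[char]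
--     return result
-- ===== Notes on version B (the rewrite author's own statement) =====
-- stated objective: idiomatic
-- what changed: Replaces the reversed-string enumerate + list of digit*5**i terms + sum with a forward left-to-right Horner accumulator (result = result*5 + digit), building no intermediate list and computing no powers.
import Mathlib
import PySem

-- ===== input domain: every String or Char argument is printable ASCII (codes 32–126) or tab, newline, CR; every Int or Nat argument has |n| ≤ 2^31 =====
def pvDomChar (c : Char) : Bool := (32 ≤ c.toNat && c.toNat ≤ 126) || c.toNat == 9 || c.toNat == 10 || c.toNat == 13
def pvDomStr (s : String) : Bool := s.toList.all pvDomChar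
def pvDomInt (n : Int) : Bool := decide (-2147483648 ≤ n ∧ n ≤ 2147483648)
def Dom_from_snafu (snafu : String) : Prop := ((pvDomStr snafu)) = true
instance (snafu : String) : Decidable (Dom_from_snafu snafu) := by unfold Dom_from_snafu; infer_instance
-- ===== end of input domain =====

-- B replaces A's reversed enumerate + digit*5**i term list + sum with a forward Horner accumulator (idiomatic).

-- the SNAFU digit table (the dict literal in both Pythons); none = KeyError, excluded by Pre_
def snafuDigit? (c : Char) : Option Int :=
  if c = '0' then some 0
  else if c = '1' then some 1
  else if c = '2' then some 2
  else if c = '=' then some (-2)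
  else if c = '-' then some (-1)
  else none

-- ===== PORT A =====
-- parts built by appending positional_value * 5**i over enumerate(snafu[::-1]); return sum(parts)
def from_snafu (snafu : String) : Int :=
  let parts : List Int :=
    (PySem.List.enumerate snafu.toList.reverse).foldl
      (fun parts ic => parts ++ [(snafuDigit? ic.2).getD 0 * (5 : Int) ^ ic.1.toNat]) []
  parts.sum

-- ===== PORT B =====
-- Horner: result = result * 5 + digit, forward over the string
def from_snafu_alt (snafu : String) : Int :=
  snafu.toList.foldl (fun result c => result * 5 + (snafuDigit? c).getD 0) 0

-- ===== PRECONDITION & SPEC =====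
-- Pre_ excludes strings with a character outside the digit table, on which both Pythons raise KeyError.
def Pre_from_snafu (snafu : String) : Prop :=
  snafu.toList.all (fun c => (snafuDigit? c).isSome) = true
instance (snafu : String) : Decidable (Pre_from_snafu snafu) := by unfold Pre_from_snafu; infer_instance

def pvWitness_from_snafu : String := "2=-01"

def Spec_from_snafu (snafu : String) (out : Int) : Prop := out = from_snafu_alt snafu
instance (snafu : String) (out : Int) : Decidable (Spec_from_snafu snafu out) := by unfold Spec_from_snafu; infer_instance

-- ===== CLAIM (what is proved, stated in full; the proofs are below) =====
def Claim_equal_from_snafu : Prop := ∀ (snafu : String), Dom_from_snafu snafu → Pre_from_snafu snafu → Spec_from_snafu snafu (from_snafu snafu)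

-- ===== LEMMAS AND PROOFS =====

-- little-endian value of a char list
def snafuVal : List Char → Int
  | [] => 0
  | c :: t => (snafuDigit? c).getD 0 + 5 * snafuVal t

theorem snafuVal_append (xs : List Char) (c : Char) :
    snafuVal (xs ++ [c]) = snafuVal xs + (snafuDigit? c).getD 0 * (5 : Int) ^ xs.length := by
  induction xs with
  | nil => simp [snafuVal]
  | cons x t ih => simp [snafuVal, ih]; ring

-- A side: the foldl over enumerate (with any start offset and any accumulated list) sums to snafuVal
theorem fromSnafu_foldl (l : List Char) (s : Int) (hs : 0 ≤ s) (acc : List Int) :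
    ((PySem.List.enumerate l s).foldl
      (fun parts ic => parts ++ [(snafuDigit? ic.2).getD 0 * (5 : Int) ^ ic.1.toNat]) acc).sum
    = acc.sum + (5 : Int) ^ s.toNat * snafuVal l := by
  induction l generalizing s acc with
  | nil => simp [PySem.List.enumerate_nil, snafuVal]
  | cons c t ih =>
    rw [PySem.List.enumerate_cons, List.foldl_cons, ih (s + 1) (by omega)]
    have : (s + 1).toNat = s.toNat + 1 := by omega
    simp [this, snafuVal, pow_succ]
    ring

-- B side: Horner with accumulator a computes a * 5^len + snafuVal of the reverse
theorem horner_foldl (l : List Char) (a : Int) :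
    l.foldl (fun result c => result * 5 + (snafuDigit? c).getD 0) a
      = a * (5 : Int) ^ l.length + snafuVal l.reverse := by
  induction l generalizing a with
  | nil => simp [snafuVal]
  | cons c t ih =>
    rw [List.foldl_cons, ih]
    simp [snafuVal_append, pow_succ]
    ring

-- ===== VERDICT (by name: the statement is the Claim_ definition above) =====
theorem from_snafu_spec : Claim_equal_from_snafu := by
  intro snafu _ _
  unfold Spec_from_snafu from_snafu from_snafu_alt
  rw [fromSnafu_foldl _ 0 le_rfl [], horner_foldl]
  simp
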